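-- pv_equiv track=rewrite | github.com/cz-fish/advent-of-code | 2022/18.py | cound_sides
-- ===== SOURCE A (Python) =====
-- SIX_DIRECTIONS = [[0, 0, 1], [0, 1, 0], [1, 0, 0], [0, 0, -1], [0, -1, 0], [-1, 0, 0]]
--
-- def cound_sides(cloud):
--     counter = 0
--     for pt in cloud:
--         for adj in SIX_DIRECTIONS:
--             nei = (pt[0] + adj[0], pt[1] + adj[1], pt[2] + adj[2])
--             if nei not in cloud:
--                 counter += 1
--     return counter
-- ===== SOURCE B (Python) =====
-- def cound_sides(cloud):
--     # Group the problem by directed faces instead of testing neighbours: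
--     # each cube contributes 6 directed faces; a directed face is exposed
--     # exactly when the oppositely-directed copy of that face never occurs.
--     faces = {}
--     for x, y, z in cloud:
--         for f in ((0, x + 1, y, z, 0), (1, x, y + 1, z, 0), (2, x, y, z + 1, 0),
--                   (0, x, y, z, 1), (1, x, y, z, 1), (2, x, y, z, 1)):
--             faces[f] = faces.get(f, 0) + 1
--     total = 0
--     for (axis, x, y, z, side), c in faces.items():
--         if (axis, x, y, z, 1 - side) not in faces:
--             total += c
--     return total
-- ===== Notes on version B (the rewrite author's own statement) =====
-- stated objective: faster
-- what changed: B never tests neighbour cubes at all: it builds a counter of the 6N directed face keys (axis, position, side) in one pass and then sums the multiplicities of the faces whose oppositely-directed key is absent, replacing A's per-neighbour linear scan of the whole list.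
import Mathlib
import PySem

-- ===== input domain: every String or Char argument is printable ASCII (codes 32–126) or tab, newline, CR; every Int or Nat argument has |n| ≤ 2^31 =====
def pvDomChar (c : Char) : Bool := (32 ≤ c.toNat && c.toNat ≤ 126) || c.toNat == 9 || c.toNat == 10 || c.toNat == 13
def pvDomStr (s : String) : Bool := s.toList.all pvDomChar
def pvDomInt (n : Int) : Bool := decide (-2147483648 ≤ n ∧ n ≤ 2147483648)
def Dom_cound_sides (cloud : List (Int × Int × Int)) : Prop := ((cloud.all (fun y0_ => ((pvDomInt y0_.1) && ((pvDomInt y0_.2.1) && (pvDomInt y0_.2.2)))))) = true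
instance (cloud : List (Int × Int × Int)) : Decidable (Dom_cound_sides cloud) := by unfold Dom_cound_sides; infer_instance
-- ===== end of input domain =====

-- B groups the work by directed faces (a counter of face keys built in one pass, then one
-- pass over the counter testing for the opposite key) instead of A's per-cube neighbour
-- scans of the whole list; return value identical.

-- ===== PORT A =====
def sixDirections : List (Int × Int × Int) :=
  [(0, 0, 1), (0, 1, 0), (1, 0, 0), (0, 0, -1), (0, -1, 0), (-1, 0, 0)]

def cound_sides (cloud : List (Int × Int × Int)) : Int :=
  cloud.foldl (fun counter pt =>
    sixDirections.foldl (fun c adj =>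
      let nei := (pt.1 + adj.1, pt.2.1 + adj.2.1, pt.2.2 + adj.2.2)
      if nei ∉ cloud then c + 1 else c) counter) 0

-- ===== PORT B =====
-- the 6 directed face keys (axis, x, y, z, side) a cube contributes
def faceEntries (p : Int × Int × Int) : List (Int × Int × Int × Int × Int) :=
  [(0, p.1 + 1, p.2.1, p.2.2, 0), (1, p.1, p.2.1 + 1, p.2.2, 0), (2, p.1, p.2.1, p.2.2 + 1, 0),
   (0, p.1, p.2.1, p.2.2, 1), (1, p.1, p.2.1, p.2.2, 1), (2, p.1, p.2.1, p.2.2, 1)]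

def cound_sides_alt (cloud : List (Int × Int × Int)) : Int :=
  let faces : PySem.Dict (Int × Int × Int × Int × Int) Int :=
    cloud.foldl (fun d p =>
      (faceEntries p).foldl (fun d f => d.insert f (d.getD f 0 + 1)) d) PySem.Dict.empty
  faces.items.foldl (fun total kv =>
    if ¬ faces.contains (kv.1.1, kv.1.2.1, kv.1.2.2.1, kv.1.2.2.2.1, 1 - kv.1.2.2.2.2)
    then total + kv.2 else total) 0

-- ===== PRECONDITION & SPEC =====
def Spec_cound_sides (cloud : List (Int × Int × Int)) (out : Int) : Prop := out = cound_sides_alt cloud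
instance (cloud : List (Int × Int × Int)) (out : Int) : Decidable (Spec_cound_sides cloud out) := by unfold Spec_cound_sides; infer_instance

-- ===== CLAIM (what is proved, stated in full; the proofs are below) =====
def Claim_equal_cound_sides : Prop := ∀ (cloud : List (Int × Int × Int)), Dom_cound_sides cloud → Spec_cound_sides cloud (cound_sides cloud)

-- ===== LEMMAS AND PROOFS =====

-- the opposite directed face key
def oppKey (f : Int × Int × Int × Int × Int) : Int × Int × Int × Int × Int :=
  (f.1, f.2.1, f.2.2.1, f.2.2.2.1, 1 - f.2.2.2.2)

-- the cube that generates a directed face key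
def ownerFn (f : Int × Int × Int × Int × Int) : Int × Int × Int :=
  if f.2.2.2.2 = 1 then (f.2.1, f.2.2.1, f.2.2.2.1)
  else if f.1 = 0 then (f.2.1 - 1, f.2.2.1, f.2.2.2.1)
  else if f.1 = 1 then (f.2.1, f.2.2.1 - 1, f.2.2.2.1)
  else (f.2.1, f.2.2.1, f.2.2.2.1 - 1)

-- the flattened directed-face list of the cloud
def allFaces (cloud : List (Int × Int × Int)) : List (Int × Int × Int × Int × Int) :=
  cloud.flatMap faceEntries

-- per-face exposure indicator (cloud form)
def hC (cloud : List (Int × Int × Int)) (f : Int × Int × Int × Int × Int) : Int :=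
  if ownerFn (oppKey f) ∈ cloud then 0 else 1

theorem owner_unique (p : Int × Int × Int) (g : Int × Int × Int × Int × Int)
    (hg : g ∈ faceEntries p) : p = ownerFn g := by
  simp only [faceEntries, List.mem_cons, List.not_mem_nil, or_false] at hg
  rcases hg with rfl | rfl | rfl | rfl | rfl | rfl <;>
    simp [ownerFn]

theorem opp_mem_owner (p : Int × Int × Int) (f : Int × Int × Int × Int × Int)
    (hf : f ∈ faceEntries p) : oppKey f ∈ faceEntries (ownerFn (oppKey f)) := by
  simp only [faceEntries, List.mem_cons, List.not_mem_nil, or_false] at hf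
  rcases hf with rfl | rfl | rfl | rfl | rfl | rfl <;>
    simp [oppKey, ownerFn, faceEntries, Prod.ext_iff]


-- for faces of the cloud: the opposite face occurs iff the opposite owner cube is in the cloud
theorem opp_mem_iff (cloud : List (Int × Int × Int)) (f : Int × Int × Int × Int × Int)
    (hf : f ∈ allFaces cloud) :
    oppKey f ∈ allFaces cloud ↔ ownerFn (oppKey f) ∈ cloud := by
  simp only [allFaces, List.mem_flatMap] at hf ⊢
  constructor
  · rintro ⟨q, hq, hmem⟩
    rwa [owner_unique q _ hmem] at hq
  · intro hq
    obtain ⟨p, _, hfp⟩ := hf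
    exact ⟨ownerFn (oppKey f), hq, opp_mem_owner p f hfp⟩

-- A's inner loop counts the exposure indicators of p's six faces
theorem innerA (cloud : List (Int × Int × Int)) (pt : Int × Int × Int) (c : Int) :
    sixDirections.foldl (fun c adj =>
      let nei := (pt.1 + adj.1, pt.2.1 + adj.2.1, pt.2.2 + adj.2.2)
      if nei ∉ cloud then c + 1 else c) c
      = c + ((faceEntries pt).map (hC cloud)).sum := by
  simp only [sixDirections, faceEntries, hC, oppKey, ownerFn, List.foldl, List.map,
    List.sum_cons, List.sum_nil, add_zero, ← sub_eq_add_neg]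
  norm_num
  split_ifs <;> omega

theorem sumA_aux (cloud l : List (Int × Int × Int)) (c : Int) :
    l.foldl (fun counter pt =>
      sixDirections.foldl (fun c adj =>
        let nei := (pt.1 + adj.1, pt.2.1 + adj.2.1, pt.2.2 + adj.2.2)
        if nei ∉ cloud then c + 1 else c) counter) c
      = c + ((l.flatMap faceEntries).map (hC cloud)).sum := by
  induction l generalizing c with
  | nil => simp
  | cons a l ih =>
    rw [List.foldl_cons, innerA cloud a c, ih, List.flatMap_cons, List.map_append,
      List.sum_append]
    ring

theorem sumA (cloud : List (Int × Int × Int)) :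
    cound_sides cloud = ((allFaces cloud).map (hC cloud)).sum := by
  have := sumA_aux cloud cloud 0
  simpa [cound_sides, allFaces] using this

-- B's counter is the counter of the flattened face list
theorem facesEq (cloud : List (Int × Int × Int)) :
    cloud.foldl (fun d p =>
      (faceEntries p).foldl (fun d f => d.insert f (d.getD f 0 + 1)) d) PySem.Dict.empty
      = PySem.Dict.counter (allFaces cloud) := by
  rw [← PySem.Dict.foldl_insert_getD_add_one_eq_counter, allFaces]
  induction cloud using List.reverseRecOn with
  | nil => rfl
  | append_singleton l a ih =>
    rw [List.foldl_append, List.flatMap_append, List.foldl_append, ih]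
    simp

theorem sumB_aux (C : (Int × Int × Int × Int × Int) → Bool)
    (l : List ((Int × Int × Int × Int × Int) × Int)) (t : Int) :
    l.foldl (fun total kv => if ¬ C (oppKey kv.1) then total + kv.2 else total) t
      = t + (l.map (fun kv => kv.2 * (if C (oppKey kv.1) then 0 else 1))).sum := by
  induction l generalizing t with
  | nil => simp
  | cons a l ih =>
    rw [List.foldl_cons, ih, List.map_cons, List.sum_cons]
    by_cases h : C (oppKey a.1) = true <;> simp [h] <;> try ring

theorem sum_single {α : Type} [DecidableEq α] (g : α → Int) (S : List α) (a : α)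
    (hnd : S.Nodup) (ha : a ∈ S) :
    (S.map (fun p => (if a = p then (1 : Int) else 0) * g p)).sum = g a := by
  induction S with
  | nil => cases ha
  | cons s S ih =>
    rcases List.nodup_cons.mp hnd with ⟨hns, hndS⟩
    rcases List.mem_cons.mp ha with h | h
    · subst h
      have hz : (S.map (fun p => (if a = p then (1 : Int) else 0) * g p)).sum = 0 := by
        apply List.sum_eq_zero
        intro x hx
        rcases List.mem_map.mp hx with ⟨p, hp, rfl⟩
        have hne : a ≠ p := fun e => hns (e ▸ hp)
        simp [hne]
      rw [List.map_cons, List.sum_cons, if_pos rfl, hz]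
      ring
    · have hsa : a ≠ s := fun e => hns (e ▸ h)
      simp only [List.map_cons, List.sum_cons, if_neg hsa, zero_mul, zero_add]
      exact ih hndS h

-- a sum over a list equals the multiplicity-weighted sum over its distinct elements
theorem core {α : Type} [BEq α] [LawfulBEq α] [DecidableEq α] (g : α → Int) (l S : List α)
    (hnd : S.Nodup) (hsub : ∀ x ∈ l, x ∈ S) :
    (l.map g).sum = (S.map (fun p => (l.count p : Int) * g p)).sum := by
  induction l with
  | nil => simp
  | cons a l ih =>
    have ha : a ∈ S := hsub a (List.mem_cons_self ..)
    have hsub' : ∀ x ∈ l, x ∈ S := fun x hx => hsub x (List.mem_cons_of_mem _ hx)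
    have hsplit : (S.map (fun p => ((a :: l).count p : Int) * g p)).sum
        = (S.map (fun p => (l.count p : Int) * g p)).sum
          + (S.map (fun p => (if a = p then (1 : Int) else 0) * g p)).sum := by
      rw [← PySem.List.sum_map_add_int]
      apply congrArg List.sum
      apply List.map_congr_left
      intro p _
      rcases eq_or_ne a p with rfl | h
      · simp
        ring
      · simp [h]
    rw [List.map_cons, List.sum_cons, ih hsub', hsplit, sum_single g S a hnd ha]
    ring

theorem sumB (cloud : List (Int × Int × Int)) :
    cound_sides_alt cloud
      = ((PySem.Set.ofList (allFaces cloud)).map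
          (fun f => ((allFaces cloud).count f : Int) * hC cloud f)).sum := by
  have h1 : cound_sides_alt cloud
      = (PySem.Dict.counter (allFaces cloud)).items.foldl (fun total kv =>
          if ¬ (PySem.Dict.counter (allFaces cloud)).contains (oppKey kv.1)
          then total + kv.2 else total) 0 := by
    unfold cound_sides_alt
    rw [facesEq]
    rfl
  rw [h1, sumB_aux, PySem.Dict.items_counter, List.map_map, zero_add]
  apply congrArg List.sum
  apply List.map_congr_left
  intro f hf
  have hfL : f ∈ allFaces cloud := (PySem.Set.mem_ofList _ f).mp hf
  have hcc : (PySem.Dict.counter (allFaces cloud)).contains (oppKey f)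
      = (allFaces cloud).contains (oppKey f) := PySem.Dict.contains_counter ..
  simp only [Function.comp, hcc, hC, List.contains_eq_mem, decide_eq_true_eq,
    opp_mem_iff cloud f hfL]

-- ===== VERDICT (by name: the statement is the Claim_ definition above) =====
theorem cound_sides_spec : Claim_equal_cound_sides := by
  intro cloud _
  show cound_sides cloud = cound_sides_alt cloud
  rw [sumA, sumB]
  exact core (hC cloud) (allFaces cloud) (PySem.Set.ofList (allFaces cloud))
    (PySem.Set.nodup_ofList _) (fun x hx => (PySem.Set.mem_ofList _ x).mpr hx)
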